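-- pv_equiv track=rewrite | github.com/masoders/wotb-highscores | tankbot/utils.py | build_snapshot_text
-- ===== SOURCE A (Python) =====
-- def build_snapshot_text(header_lines: list[str], row_lines: list[str], footer_lines: list[str]) -> str:
--     # Discord hard limit
--     DISCORD_MAX = 2000
--     SAFETY = 150  # room for footer/truncation note
--
--     out: list[str] = []
--     out.extend(header_lines)
--     out.append("")
--
--     current = "\n".join(out) + "\n"
--     remaining = DISCORD_MAX - SAFETY - len(current)
--
--     included = 0
--     for line in row_lines:
--         if len(line) + 1 > remaining:
--             break
--         out.append(line)
--         remaining -= (len(line) + 1)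
--         included += 1
--
--     if included < len(row_lines):
--         hidden = len(row_lines) - included
--         out.append(f"… (+{hidden} more tanks)")
--
--     out.append("")
--     out.extend(footer_lines)
--
--     text = "\n".join(out)
--     return text[:DISCORD_MAX]
-- ===== SOURCE B (Python) =====
-- from itertools import accumulate
-- from bisect import bisect_right
--
--
-- def build_snapshot_text(header_lines: list[str], row_lines: list[str], footer_lines: list[str]) -> str:
--     DISCORD_MAX = 2000
--     SAFETY = 150  # room for footer/truncation note
--
--     header = header_lines + [""]
--     remaining = DISCORD_MAX - SAFETY - (len("\n".join(header)) + 1)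
--
--     # cumulative cost of the first k rows (each row costs len+1 for its newline);
--     # the number of rows that fit is found by binary search instead of a break loop
--     cum = list(accumulate(len(line) + 1 for line in row_lines))
--     included = bisect_right(cum, remaining)
--
--     parts = header + row_lines[:included]
--     if included < len(row_lines):
--         parts.append(f"… (+{len(row_lines) - included} more tanks)")
--     parts.append("")
--     parts.extend(footer_lines)
--
--     return "\n".join(parts)[:DISCORD_MAX]
-- ===== Notes on version B (the rewrite author's own statement) =====
-- stated objective: alternative
-- what changed: The greedy append/break loop over row_lines is replaced by cumulative costs (itertools.accumulate) plus bisect_right to compute the cutoff, and the fitting rows are added by one slice row_lines[:included].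
import Mathlib
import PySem

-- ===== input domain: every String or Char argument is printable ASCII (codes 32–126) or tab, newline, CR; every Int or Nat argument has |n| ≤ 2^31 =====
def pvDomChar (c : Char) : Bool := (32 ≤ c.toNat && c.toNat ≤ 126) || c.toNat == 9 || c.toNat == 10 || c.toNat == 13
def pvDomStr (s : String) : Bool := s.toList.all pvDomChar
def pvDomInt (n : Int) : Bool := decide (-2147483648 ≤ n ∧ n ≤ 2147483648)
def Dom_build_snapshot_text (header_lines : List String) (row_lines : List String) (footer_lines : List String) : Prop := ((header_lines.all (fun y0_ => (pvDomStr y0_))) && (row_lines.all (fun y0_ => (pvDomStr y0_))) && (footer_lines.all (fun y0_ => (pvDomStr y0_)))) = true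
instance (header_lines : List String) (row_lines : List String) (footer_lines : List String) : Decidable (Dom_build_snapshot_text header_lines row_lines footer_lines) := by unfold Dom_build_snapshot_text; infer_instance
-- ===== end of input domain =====

-- B replaces A's greedy append/break row loop with prefix-sum costs + bisect_right and one slice (alternative decomposition, same cost).


-- shared formatting helper: the f-string "… (+{hidden} more tanks)"
def pvNote (hidden : Int) : String :=
  String.ofList ("… (+".toList ++ PySem.Int.toChars hidden ++ " more tanks)".toList)

-- ===== PORT A =====
-- the for/break loop over row_lines: state (out, remaining, included); break = stop recursing
def pvLoopA : List String → List String → Int → Int → (List String × Int)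
  | [], out, _, included => (out, included)
  | line :: rest, out, remaining, included =>
    if PySem.Str.len line + 1 > remaining then (out, included)
    else pvLoopA rest (out ++ [line]) (remaining - (PySem.Str.len line + 1)) (included + 1)

def build_snapshot_text (header_lines : List String) (row_lines : List String) (footer_lines : List String) : String :=
  let DISCORD_MAX : Int := 2000
  let SAFETY : Int := 150
  let out := header_lines ++ [""]
  -- current = "\n".join(out) + "\n"; only len(current) is used, and len(x + "\n") = len(x) + 1
  let currentLen := PySem.Str.len (PySem.Str.join "\n" out) + 1
  let remaining := DISCORD_MAX - SAFETY - currentLen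
  let (out, included) := pvLoopA row_lines out remaining 0
  let out := if included < PySem.List.len row_lines then
      out ++ [pvNote (PySem.List.len row_lines - included)]
    else out
  let out := out ++ [""] ++ footer_lines
  let text := PySem.Str.join "\n" out
  PySem.Str.slice text none (some DISCORD_MAX)

-- ===== PORT B =====
-- itertools.accumulate on the per-row costs
def pvAccumulate : List Int → List Int
  | [] => []
  | c :: cs => c :: (pvAccumulate cs).map (fun x => c + x)

def build_snapshot_text_alt (header_lines : List String) (row_lines : List String) (footer_lines : List String) : String :=
  let DISCORD_MAX : Int := 2000
  let SAFETY : Int := 150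
  let header := header_lines ++ [""]
  let remaining := DISCORD_MAX - SAFETY - (PySem.Str.len (PySem.Str.join "\n" header) + 1)
  let cum := pvAccumulate (row_lines.map (fun line => PySem.Str.len line + 1))
  let included := PySem.List.bisectRight cum remaining
  let parts := header ++ PySem.List.slice row_lines none (some (included : Int))
  let parts := if (included : Int) < PySem.List.len row_lines then
      parts ++ [pvNote (PySem.List.len row_lines - (included : Int))]
    else parts
  let parts := parts ++ [""] ++ footer_lines
  PySem.Str.slice (PySem.Str.join "\n" parts) none (some DISCORD_MAX)

-- ===== PRECONDITION & SPEC =====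
def Spec_build_snapshot_text (header_lines : List String) (row_lines : List String) (footer_lines : List String) (out : String) : Prop := out = build_snapshot_text_alt header_lines row_lines footer_lines
instance (header_lines : List String) (row_lines : List String) (footer_lines : List String) (out : String) : Decidable (Spec_build_snapshot_text header_lines row_lines footer_lines out) := by unfold Spec_build_snapshot_text; infer_instance

-- ===== CLAIM (what is proved, stated in full; the proofs are below) =====
def Claim_equal_build_snapshot_text : Prop := ∀ (header_lines : List String) (row_lines : List String) (footer_lines : List String), Dom_build_snapshot_text header_lines row_lines footer_lines → Spec_build_snapshot_text header_lines row_lines footer_lines (build_snapshot_text header_lines row_lines footer_lines)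

-- ===== LEMMAS AND PROOFS =====

-- the greedy cutoff of A's loop, as a standalone count over the per-row costs
def pvCntC : List Int → Int → Nat
  | [], _ => 0
  | c :: cs, remaining => if c > remaining then 0 else pvCntC cs (remaining - c) + 1

theorem pvLoopA_eq (r : List String) : ∀ (out : List String) (rem inc : Int),
    pvLoopA r out rem inc
      = (out ++ r.take (pvCntC (r.map (fun l => PySem.Str.len l + 1)) rem),
         inc + (pvCntC (r.map (fun l => PySem.Str.len l + 1)) rem : Int)) := by
  induction r with
  | nil => intro out rem inc; simp [pvLoopA, pvCntC]
  | cons l ls ih =>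
    intro out rem inc
    simp only [pvLoopA, List.map_cons, pvCntC]
    split
    · simp
    · rw [ih]
      simp [List.append_assoc]
      omega

theorem pvCntC_le (cs : List Int) (rem : Int) : pvCntC cs rem ≤ cs.length := by
  induction cs generalizing rem with
  | nil => simp [pvCntC]
  | cons c cs ih =>
    simp only [pvCntC]
    split
    · simp
    · simpa using ih _

theorem pvAccumulate_length (cs : List Int) : (pvAccumulate cs).length = cs.length := by
  induction cs with
  | nil => rfl
  | cons c cs ih => simp [pvAccumulate, ih]

theorem pvAccumulate_nonneg (cs : List Int) (h : ∀ c ∈ cs, 0 ≤ c) :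
    ∀ x ∈ pvAccumulate cs, 0 ≤ x := by
  induction cs with
  | nil => simp [pvAccumulate]
  | cons c cs ih =>
    simp only [pvAccumulate, List.mem_cons, List.mem_map]
    rintro x (rfl | ⟨y, hy, rfl⟩)
    · exact h _ (by simp)
    · have := ih (fun d hd => h d (by simp [hd])) y hy
      have := h c (by simp)
      omega

theorem pvAccumulate_sorted (cs : List Int) (h : ∀ c ∈ cs, 0 ≤ c) :
    (pvAccumulate cs).Pairwise (fun a b => a ≤ b) := by
  induction cs with
  | nil => simp [pvAccumulate]
  | cons c cs ih =>
    simp only [pvAccumulate]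
    refine List.pairwise_cons.mpr ⟨?_, ?_⟩
    · intro x hx
      obtain ⟨y, hy, rfl⟩ := List.mem_map.mp hx
      have := pvAccumulate_nonneg cs (fun d hd => h d (by simp [hd])) y hy
      omega
    · exact (List.pairwise_map).mpr <| (ih (fun d hd => h d (by simp [hd]))).imp (by omega)

-- the greedy count satisfies the bisect_right characterisation on the prefix sums
theorem pvCntC_spec (cs : List Int) (rem : Int) :
    (∀ j (hj : j < (pvAccumulate cs).length),
        j < pvCntC cs rem → (pvAccumulate cs)[j] ≤ rem) ∧
    (∀ hk : pvCntC cs rem < (pvAccumulate cs).length,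
        rem < (pvAccumulate cs)[pvCntC cs rem]) := by
  induction cs generalizing rem with
  | nil => simp [pvCntC, pvAccumulate]
  | cons c cs ih =>
    simp only [pvAccumulate, pvCntC]
    split
    · rename_i hbig
      refine ⟨by simp, ?_⟩
      intro hk
      simpa using by omega
    · rename_i hfit
      obtain ⟨ih1, ih2⟩ := ih (rem - c)
      constructor
      · intro j hj hlt
        cases j with
        | zero => simpa using by omega
        | succ j =>
          simp only [List.getElem_cons_succ, List.getElem_map]
          have := ih1 j (by simpa using hj) (by omega)
          omega
      · intro hk
        simp only [List.getElem_cons_succ, List.getElem_map]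
        have := ih2 (by simpa using hk)
        omega

theorem pvCntC_eq_bisect (cs : List Int) (rem : Int) (h : ∀ c ∈ cs, 0 ≤ c) :
    PySem.List.bisectRight (pvAccumulate cs) rem = pvCntC cs rem := by
  obtain ⟨hble, hb1, hb2⟩ := PySem.List.bisectRight_spec (pvAccumulate cs) rem
    (pvAccumulate_sorted cs h)
  obtain ⟨hc1, hc2⟩ := pvCntC_spec cs rem
  have hclen : pvCntC cs rem ≤ (pvAccumulate cs).length := by
    rw [pvAccumulate_length]; exact pvCntC_le cs rem
  rcases Nat.lt_trichotomy (PySem.List.bisectRight (pvAccumulate cs) rem) (pvCntC cs rem)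
    with hlt | heq | hgt
  · have hr : PySem.List.bisectRight (pvAccumulate cs) rem < (pvAccumulate cs).length := by omega
    have := hc1 _ hr hlt
    have := hb2 _ hr (le_refl _)
    omega
  · exact heq
  · have hr : pvCntC cs rem < (pvAccumulate cs).length := by omega
    have := hb1 _ hr hgt
    have := hc2 hr
    omega

-- ===== VERDICT (by name: the statement is the Claim_ definition above) =====
theorem build_snapshot_text_spec : Claim_equal_build_snapshot_text := by
  intro h r f _
  show build_snapshot_text h r f = build_snapshot_text_alt h r f
  have hpos : ∀ c ∈ r.map (fun l => PySem.Str.len l + 1), 0 ≤ c := by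
    intro c hc
    obtain ⟨l, _, rfl⟩ := List.mem_map.mp hc
    have := PySem.Str.len_eq l
    omega
  simp only [build_snapshot_text, build_snapshot_text_alt, pvLoopA_eq, zero_add,
    pvCntC_eq_bisect _ _ hpos, PySem.List.slice_to_natCast]
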